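-- pv_equiv track=rewrite | github.com/mrekin/MeshtasticCustomBoards | additional_files/inipio.py | infillDict
-- ===== SOURCE A (Python) =====
-- def infillDict(config_dict, section, filledSections):
--     """Fill dict recursively by parent sections via extends param"""
--     if section in filledSections:
--         return config_dict
--
--     if 'extends' in config_dict.get(section, {}):
--         # Parse multiple parents separated by comma (left to right priority)
--         parents = [p.strip() for p in config_dict[section]['extends'].split(',')]
--         for parent in parents:
--             if parent in config_dict:
--                 infillDict(config_dict, parent, filledSections)
--                 # Copy keys from parent (later parents override earlier ones)
--                 for key in config_dict[parent]:
--                     if key not in config_dict[section]: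
--                         config_dict[section][key] = config_dict[parent][key]
--
--     filledSections.append(section)
--     return config_dict
-- ===== SOURCE B (Python) =====
-- def infillDict(config_dict, section, filledSections):
--     """Iterative explicit-stack post-order DFS over the extends graph
--     (same return value and same in-place mutations as the recursive version)."""
--     stack = [("visit", section, None)]
--     while stack:
--         op, s, p = stack.pop()
--         if op == "visit":
--             if s in filledSections:
--                 continue
--             sec = config_dict.get(s, {})
--             if 'extends' in sec:
--                 parents = [q.strip() for q in sec['extends'].split(',')]
--                 ops = [("finish", s, None)]
--                 for q in reversed(parents):
--                     if q in config_dict: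
--                         ops.append(("merge", s, q))
--                         ops.append(("visit", q, None))
--                 stack.extend(ops)
--             else:
--                 filledSections.append(s)
--         elif op == "merge":
--             src = config_dict[p]
--             dst = config_dict[s]
--             for k, v in list(src.items()):
--                 if k not in dst:
--                     dst[k] = v
--         else:  # finish
--             filledSections.append(s)
--     return config_dict
-- ===== Notes on version B (the rewrite author's own statement) =====
-- stated objective: alternative
-- what changed: The recursive post-order fill is replaced by an iterative explicit-stack DFS over visit/merge/finish frames (no Python recursion, merges and filledSections appends performed in the same post-order by a while-loop over a work stack).
import Mathlib
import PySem

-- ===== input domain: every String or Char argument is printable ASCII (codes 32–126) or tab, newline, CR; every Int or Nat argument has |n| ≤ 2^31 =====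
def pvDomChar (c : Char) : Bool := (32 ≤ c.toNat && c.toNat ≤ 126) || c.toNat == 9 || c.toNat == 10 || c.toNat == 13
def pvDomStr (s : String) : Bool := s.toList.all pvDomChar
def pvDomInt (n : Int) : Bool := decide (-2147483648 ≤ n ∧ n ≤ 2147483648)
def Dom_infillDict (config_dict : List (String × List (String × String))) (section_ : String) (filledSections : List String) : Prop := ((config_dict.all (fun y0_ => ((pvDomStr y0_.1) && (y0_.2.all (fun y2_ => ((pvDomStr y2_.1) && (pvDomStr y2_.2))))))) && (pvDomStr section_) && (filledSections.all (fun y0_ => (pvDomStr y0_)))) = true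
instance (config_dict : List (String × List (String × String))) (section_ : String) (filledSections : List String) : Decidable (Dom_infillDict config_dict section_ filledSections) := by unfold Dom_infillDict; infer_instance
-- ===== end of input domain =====

-- B rewrites the recursive post-order fill as an explicit-stack iterative DFS (visit/merge/finish
-- frames); same return value. Both Pythons mutate config_dict/filledSections in place in the same
-- way; the theorems below are about the returned dict.

-- ===== PORT A =====
-- shared small helpers (Python `d[section][key] = v`, `d.get(s, {})['extends']`, parent parsing)
def pvSetIn (cd : List (String × List (String × String))) (s k v : String) : List (String × List (String × String)) :=
  match cd with
  | [] => []
  | (a, b) :: t => if a == s then (a, b ++ [(k, v)]) :: t else (a, b) :: pvSetIn t s k v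

def pvExtOpt (cd : List (String × List (String × String))) (s : String) : Option String :=
  List.lookup "extends" ((List.lookup s cd).getD [])

-- parents = [p.strip() for p in config_dict[section]['extends'].split(',')]
def pvParents (cd : List (String × List (String × String))) (s : String) : List String :=
  ((PySem.Str.split? ((pvExtOpt cd s).getD "") ",").getD []).map PySem.Str.strip

-- A's inner merge loop: iterates the KEYS of config_dict[parent] (captured before the loop),
-- reading the value freshly from the current dict, copying only keys absent in config_dict[section]
def pvMergeA (cd : List (String × List (String × String))) (s p : String) : List (String × List (String × String)) :=
  (((List.lookup p cd).getD []).map (·.1)).foldl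
    (fun acc k =>
      if (List.lookup k ((List.lookup s acc).getD [])).isSome then acc
      else pvSetIn acc s k ((List.lookup k ((List.lookup p acc).getD [])).getD "")) cd

-- A's `for parent in parents` loop (rec = the recursive call one fuel level down)
def pvLoopA (rec : List (String × List (String × String)) → String → List String → Option (List (String × List (String × String)) × List String))
    (s : String) (ps : List String) (cd : List (String × List (String × String))) (f : List String) :
    Option (List (String × List (String × String)) × List String) :=
  ps.foldl (fun acc p =>
    match acc with
    | none => none
    | some st =>
      if (List.lookup p st.1).isSome then
        match rec st.1 p st.2 with
        | none => none
        | some st' => some (pvMergeA st'.1 s p, st'.2)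
      else some st) (some (cd, f))

-- fuel-guarded transliteration of A's recursion (fuel `none` = the recursion is still running;
-- under Pre_ the fuel used in `infillDict` below is proved sufficient)
def pvFillA : Nat → List (String × List (String × String)) → String → List String →
    Option (List (String × List (String × String)) × List String)
  | 0, _, _, _ => none
  | n+1, cd, s, f =>
    if s ∈ f then some (cd, f)
    else
      if (pvExtOpt cd s).isSome then
        match pvLoopA (pvFillA n) s (pvParents cd s) cd f with
        | none => none
        | some st => some (st.1, st.2 ++ [s])
      else some (cd, f ++ [s])

def infillDict (config_dict : List (String × List (String × String))) (section_ : String) (filledSections : List String) : List (String × List (String × String)) :=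
  match pvFillA (config_dict.length + 2) config_dict section_ filledSections with
  | some st => st.1
  | none => config_dict

-- ===== PORT B =====
inductive PvFrame where
  | visit : String → PvFrame
  | merge : String → String → PvFrame
  | fin : String → PvFrame
deriving DecidableEq, Repr

-- B's merge: iterates the ITEMS (key, value) of config_dict[parent], captured once
def pvMergeB (cd : List (String × List (String × String))) (s p : String) : List (String × List (String × String)) :=
  ((List.lookup p cd).getD []).foldl
    (fun acc kv =>
      if (List.lookup kv.1 ((List.lookup s acc).getD [])).isSome then acc
      else pvSetIn acc s kv.1 kv.2) cd

-- frames pushed on expanding s, in pop order: visit p₁, merge s p₁, …, visit pₖ, merge s pₖ, finish s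
def pvPush (cd : List (String × List (String × String))) (s : String) (ps : List String) : List PvFrame :=
  ps.foldr (fun q acc => if (List.lookup q cd).isSome then PvFrame.visit q :: PvFrame.merge s q :: acc else acc) [PvFrame.fin s]

-- the while-stack loop, with a step-count fuel as totality guard (none = still looping)
def pvRunB : Nat → List (String × List (String × String)) → List String → List PvFrame →
    Option (List (String × List (String × String)) × List String)
  | 0, _, _, _ => none
  | _+1, cd, f, [] => some (cd, f)
  | m+1, cd, f, PvFrame.visit s :: rest =>
    if s ∈ f then pvRunB m cd f rest
    else
      if (pvExtOpt cd s).isSome then pvRunB m cd f (pvPush cd s (pvParents cd s) ++ rest)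
      else pvRunB m cd (f ++ [s]) rest
  | m+1, cd, f, PvFrame.merge s p :: rest => pvRunB m (pvMergeB cd s p) f rest
  | m+1, cd, f, PvFrame.fin s :: rest => pvRunB m cd (f ++ [s]) rest

-- fuel bound: pvH P n bounds the number of stack steps a terminating run takes (P bounds any
-- parents-list length, n the recursion depth); proved sufficient under Pre_
def pvMaxPar (cd : List (String × List (String × String))) : Nat :=
  cd.foldr (fun e a => max (((PySem.Str.split? ((List.lookup "extends" e.2).getD "") ",").getD []).map PySem.Str.strip).length a) 1

def pvH (P : Nat) : Nat → Nat
  | 0 => 1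
  | n+1 => (P+1) * (pvH P n + 2) + 2

def infillDict_alt (config_dict : List (String × List (String × String))) (section_ : String) (filledSections : List String) : List (String × List (String × String)) :=
  match pvRunB (pvH (pvMaxPar config_dict) (config_dict.length + 2) + 1) config_dict filledSections [PvFrame.visit section_] with
  | some st => st.1
  | none => config_dict

-- ===== PRECONDITION & SPEC =====
-- successors of s in the inheritance graph: its parsed parents that are keys of the dict,
-- none if s is already in filledSections
def pvSucc (cd : List (String × List (String × String))) (f : List String) (s : String) : List String :=
  if s ∈ f then []
  else if (pvExtOpt cd s).isSome then (pvParents cd s).filter (fun p => (List.lookup p cd).isSome) else []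

-- pvReach k S is the k-step closure of the one-step successor relation above: plain graph
-- reachability in the (static) inheritance graph read off the input, not a run of either port
def pvGrow (cd : List (String × List (String × String))) (f : List String) (S : List String) : List String :=
  PySem.Set.ofList (S ++ S.flatMap (pvSucc cd f))

def pvReach (cd : List (String × List (String × String))) (f : List String) : Nat → List String → List String
  | 0, S => S
  | k+1, S => pvReach cd f k (pvGrow cd f S)

-- Pre_ excludes exactly the inputs on which A's recursion never returns (Python RecursionError):
-- those where a cycle of the `extends` graph is reachable from section_ through sections not in
-- filledSections. On every input where A returns, Pre_ holds.
def Pre_infillDict (config_dict : List (String × List (String × String))) (section_ : String) (filledSections : List String) : Prop :=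
  ∀ x ∈ pvReach config_dict filledSections (config_dict.length + 3) [section_],
    x ∉ pvReach config_dict filledSections (config_dict.length + 3) (pvSucc config_dict filledSections x)
instance (config_dict : List (String × List (String × String))) (section_ : String) (filledSections : List String) : Decidable (Pre_infillDict config_dict section_ filledSections) := by unfold Pre_infillDict; infer_instance

def pvWitness_infillDict : (List (String × List (String × String))) × String × List String :=
  ([("a", [("extends", "b, c"), ("x", "1")]), ("b", [("y", "2")]), ("c", [("extends", "b"), ("z", "3")])], "a", [])

def Spec_infillDict (config_dict : List (String × List (String × String))) (section_ : String) (filledSections : List String) (out : List (String × List (String × String))) : Prop := out = infillDict_alt config_dict section_ filledSections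
instance (config_dict : List (String × List (String × String))) (section_ : String) (filledSections : List String) (out : List (String × List (String × String))) : Decidable (Spec_infillDict config_dict section_ filledSections out) := by unfold Spec_infillDict; infer_instance

-- ===== CLAIM (what is proved, stated in full; the proofs are below) =====
def Claim_equal_infillDict : Prop := ∀ (config_dict : List (String × List (String × String))) (section_ : String) (filledSections : List String), Dom_infillDict config_dict section_ filledSections → Pre_infillDict config_dict section_ filledSections → Spec_infillDict config_dict section_ filledSections (infillDict config_dict section_ filledSections)

-- ===== LEMMAS AND PROOFS =====
-- abbreviation used only in proofs
abbrev pvCd := List (String × List (String × String))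

-- ---- basic lookup / setIn facts ----
theorem pv_lookup_mem {β : Type} (l : List (String × β)) (a : String) (b : β)
    (h : List.lookup a l = some b) : (a, b) ∈ l := by
  induction l with
  | nil => simp [List.lookup] at h
  | cons x t ih =>
    rw [List.lookup] at h
    by_cases hx : a == x.1
    · simp [hx] at h; simp at hx; subst hx; obtain ⟨x1, x2⟩ := x; simp_all
    · simp [hx] at h ⊢; right; exact ih h

theorem pv_lookup_isSome_mem {β : Type} (l : List (String × β)) (a : String)
    (h : (List.lookup a l).isSome) : a ∈ l.map (·.1) := by
  obtain ⟨b, hb⟩ := Option.isSome_iff_exists.mp h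
  exact List.mem_map.mpr ⟨(a, b), pv_lookup_mem l a b hb, rfl⟩

theorem pv_lookup_pvSetIn_ne (cd : pvCd) (s k v t : String) (h : t ≠ s) :
    List.lookup t (pvSetIn cd s k v) = List.lookup t cd := by
  induction cd with
  | nil => rfl
  | cons x tl ih =>
    obtain ⟨a, b⟩ := x
    by_cases ha : a = s
    · subst ha
      have hb : (t == a) = false := by simp [h]
      simp [pvSetIn, List.lookup, hb]
    · simp only [pvSetIn, beq_iff_eq, if_neg ha, List.lookup]
      by_cases ht : t = a
      · have hb : (t == a) = true := by simp [ht]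
        simp [hb]
      · have hb : (t == a) = false := by simp [ht]
        simp [hb, ih]

theorem pv_lookup_pvSetIn_self (cd : pvCd) (s k v : String) :
    List.lookup s (pvSetIn cd s k v) = (List.lookup s cd).map (fun b => b ++ [(k, v)]) := by
  induction cd with
  | nil => rfl
  | cons x tl ih =>
    obtain ⟨a, b⟩ := x
    by_cases ha : a = s
    · subst ha; simp [pvSetIn, List.lookup]
    · have hb : (s == a) = false := by simp [Ne.symm ha]
      simp [pvSetIn, List.lookup, beq_iff_eq, ha, hb, ih]

theorem pv_lookup_pvSetIn_isSome (cd : pvCd) (s k v t : String) :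
    (List.lookup t (pvSetIn cd s k v)).isSome = (List.lookup t cd).isSome := by
  by_cases h : t = s
  · subst h; rw [pv_lookup_pvSetIn_self]; cases List.lookup t cd <;> rfl
  · rw [pv_lookup_pvSetIn_ne cd s k v t h]

theorem pv_pvExtOpt_pvSetIn (cd : pvCd) (s k v t : String) (hex : (pvExtOpt cd s).isSome) :
    pvExtOpt (pvSetIn cd s k v) t = pvExtOpt cd t := by
  by_cases h : t = s
  · subst h
    unfold pvExtOpt at *
    rw [pv_lookup_pvSetIn_self]
    cases hl : List.lookup t cd with
    | none => simp [hl] at hex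
    | some b =>
      simp only [Option.map_some, Option.getD_some]
      rw [List.lookup_append]
      rw [hl] at hex
      simp only [Option.getD_some] at hex
      cases hb : List.lookup "extends" b with
      | none => rw [hb] at hex; simp at hex
      | some w => simp
  · unfold pvExtOpt; rw [pv_lookup_pvSetIn_ne cd s k v t h]

-- ---- the invariant carried through the computation ----
def pvInv (cd0 : pvCd) (f0 : List String) (cd : pvCd) (f : List String) : Prop :=
  (∀ t, pvExtOpt cd t = pvExtOpt cd0 t) ∧
  (∀ p, (List.lookup p cd).isSome = (List.lookup p cd0).isSome) ∧
  (∀ x ∈ f0, x ∈ f)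

theorem pvInv_refl (cd : pvCd) (f : List String) : pvInv cd f cd f :=
  ⟨fun _ => rfl, fun _ => rfl, fun _ h => h⟩

theorem pvInv_trans {cd0 f0 cd1 f1 cd2 f2} (h1 : pvInv cd0 f0 cd1 f1) (h2 : pvInv cd1 f1 cd2 f2) :
    pvInv cd0 f0 cd2 f2 :=
  ⟨fun t => (h2.1 t).trans (h1.1 t), fun p => (h2.2.1 p).trans (h1.2.1 p),
   fun x hx => h2.2.2 x (h1.2.2 x hx)⟩

theorem pvInv_appendF {cd0 f0 cd f} (l : List String) (h : pvInv cd0 f0 cd f) :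
    pvInv cd0 f0 cd (f ++ l) :=
  ⟨h.1, h.2.1, fun x hx => List.mem_append_left _ (h.2.2 x hx)⟩

theorem pv_foldSetIn_inv {α : Type} (s : String) (key : α → String) (val : pvCd → α → String) :
    ∀ (l : List α) (acc : pvCd), (pvExtOpt acc s).isSome →
      (pvExtOpt (l.foldl (fun a x => if (List.lookup (key x) ((List.lookup s a).getD [])).isSome then a else pvSetIn a s (key x) (val a x)) acc) s).isSome ∧
      (∀ t, pvExtOpt (l.foldl (fun a x => if (List.lookup (key x) ((List.lookup s a).getD [])).isSome then a else pvSetIn a s (key x) (val a x)) acc) t = pvExtOpt acc t) ∧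
      (∀ q, (List.lookup q (l.foldl (fun a x => if (List.lookup (key x) ((List.lookup s a).getD [])).isSome then a else pvSetIn a s (key x) (val a x)) acc)).isSome = (List.lookup q acc).isSome) := by
  intro l
  induction l with
  | nil => intro acc hex; exact ⟨hex, fun _ => rfl, fun _ => rfl⟩
  | cons x tl ih =>
    intro acc hex
    simp only [List.foldl_cons]
    by_cases hg : (List.lookup (key x) ((List.lookup s acc).getD [])).isSome
    · rw [if_pos hg]; exact ih acc hex
    · rw [if_neg hg]
      have hex' : (pvExtOpt (pvSetIn acc s (key x) (val acc x)) s).isSome := by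
        rw [pv_pvExtOpt_pvSetIn _ _ _ _ _ hex]; exact hex
      obtain ⟨h1, h2, h3⟩ := ih (pvSetIn acc s (key x) (val acc x)) hex'
      refine ⟨h1, fun t => ?_, fun q => ?_⟩
      · rw [h2 t, pv_pvExtOpt_pvSetIn _ _ _ _ _ hex]
      · rw [h3 q, pv_lookup_pvSetIn_isSome]

theorem pvMergeA_inv (cd : pvCd) (s p : String) (f : List String) (hex : (pvExtOpt cd s).isSome) :
    pvInv cd f (pvMergeA cd s p) f ∧ (pvExtOpt (pvMergeA cd s p) s).isSome := by
  obtain ⟨h1, h2, h3⟩ := pv_foldSetIn_inv s (fun k => k)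
    (fun a k => (List.lookup k ((List.lookup p a).getD [])).getD "")
    (((List.lookup p cd).getD []).map (·.1)) cd hex
  exact ⟨⟨h2, h3, fun _ h => h⟩, h1⟩

theorem pvFillA_inv : ∀ (n : Nat) (cd : pvCd) (s : String) (f : List String) (st : pvCd × List String),
    pvFillA n cd s f = some st → pvInv cd f st.1 st.2 := by
  intro n
  induction n with
  | zero => intro cd s f st h; simp [pvFillA] at h
  | succ n ih =>
    -- inner loop invariant
    have loop : ∀ (s : String) (ps : List String) (cd : pvCd) (f : List String) (st : pvCd × List String),
        (pvExtOpt cd s).isSome → pvLoopA (pvFillA n) s ps cd f = some st →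
        pvInv cd f st.1 st.2 ∧ (pvExtOpt st.1 s).isSome := by
      intro s ps
      induction ps with
      | nil =>
        intro cd f st hex h
        simp only [pvLoopA, List.foldl_nil] at h
        cases h; exact ⟨pvInv_refl cd f, hex⟩
      | cons p tl ihp =>
        intro cd f st hex h
        simp only [pvLoopA, List.foldl_cons] at h
        by_cases hg : (List.lookup p cd).isSome
        · rw [if_pos hg] at h
          cases hrec : pvFillA n cd p f with
          | none =>
            rw [hrec] at h
            exfalso
            have : ∀ (tl : List String), tl.foldl (fun acc p =>
              match acc with
              | none => none
              | some st =>
                if (List.lookup p st.1).isSome then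
                  match pvFillA n st.1 p st.2 with
                  | none => none
                  | some st' => some (pvMergeA st'.1 s p, st'.2)
                else some st) none = none := by
              intro tl; induction tl with
              | nil => rfl
              | cons a t iht => simpa using iht
            rw [this tl] at h; simp at h
          | some st' =>
            rw [hrec] at h
            have hinv1 : pvInv cd f st'.1 st'.2 := ih cd p f st' hrec
            have hex1 : (pvExtOpt st'.1 s).isSome := by rw [hinv1.1 s]; exact hex
            obtain ⟨hmi, hme⟩ := pvMergeA_inv st'.1 s p st'.2 hex1
            have hinv2 : pvInv cd f (pvMergeA st'.1 s p) st'.2 := pvInv_trans hinv1 hmi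
            have := ihp (pvMergeA st'.1 s p) st'.2 st hme (by simpa [pvLoopA] using h)
            exact ⟨pvInv_trans hinv2 this.1, this.2⟩
        · rw [if_neg hg] at h
          exact ihp cd f st hex (by simpa [pvLoopA] using h)
    intro cd s f st h
    rw [pvFillA] at h
    by_cases hmem : s ∈ f
    · rw [if_pos hmem] at h; cases h; exact pvInv_refl cd f
    · rw [if_neg hmem] at h
      by_cases hex : (pvExtOpt cd s).isSome
      · rw [if_pos hex] at h
        cases hl : pvLoopA (pvFillA n) s (pvParents cd s) cd f with
        | none => rw [hl] at h; simp at h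
        | some st1 =>
          rw [hl] at h
          cases h
          exact pvInv_appendF [s] (loop s (pvParents cd s) cd f st1 hex hl).1
      · rw [if_neg hex] at h; cases h; exact pvInv_appendF [s] (pvInv_refl cd f)

-- ---- A's merge loop (over keys, re-reading values) equals B's merge loop (over items) ----
theorem pv_mem_fst_lookup_isSome {β : Type} (l : List (String × β)) (k : String) (v : β)
    (h : (k, v) ∈ l) : (List.lookup k l).isSome := by
  induction l with
  | nil => simp at h
  | cons x t ih =>
    rcases List.mem_cons.mp h with h | h
    · subst h; simp [List.lookup]
    · rw [List.lookup]
      cases hk : (k == x.1) with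
      | true => simp
      | false => simp only []; exact ih h

theorem pv_lookup_append_isSome {β : Type} (l1 l2 : List (String × β)) (a : String) :
    (List.lookup a (l1 ++ l2)).isSome = ((List.lookup a l1).isSome || (List.lookup a l2).isSome) := by
  rw [List.lookup_append]
  cases List.lookup a l1 <;> simp

theorem pvSetIn_id_of_none (cd : pvCd) (s k v : String) (h : List.lookup s cd = none) :
    pvSetIn cd s k v = cd := by
  induction cd with
  | nil => rfl
  | cons x t ih =>
    obtain ⟨a, b⟩ := x
    rw [List.lookup] at h
    cases hx : (s == a) with
    | true => rw [hx] at h; simp at h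
    | false =>
      rw [hx] at h
      simp only at h
      have hne : ¬(a = s) := by simp at hx; exact fun e => hx e.symm
      simp only [pvSetIn, beq_iff_eq, if_neg hne]
      rw [ih h]

theorem pvMergeAux (s p : String) (hps : p ≠ s) (src0 : List (String × String)) :
    ∀ (rest done : List (String × String)) (acc : pvCd),
      (List.lookup p acc).getD [] = src0 →
      src0 = done ++ rest →
      (List.lookup s acc).isSome →
      (∀ x ∈ done, (List.lookup x.1 ((List.lookup s acc).getD [])).isSome) →
      (rest.map (·.1)).foldl
        (fun a k => if (List.lookup k ((List.lookup s a).getD [])).isSome then a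
                    else pvSetIn a s k ((List.lookup k ((List.lookup p a).getD [])).getD "")) acc =
      rest.foldl
        (fun a kv => if (List.lookup kv.1 ((List.lookup s a).getD [])).isSome then a
                     else pvSetIn a s kv.1 kv.2) acc := by
  intro rest
  induction rest with
  | nil => intro done acc _ _ _ _; rfl
  | cons kv rest' ih =>
    intro done acc hacc hsplit haccS hdone
    simp only [List.map_cons, List.foldl_cons]
    by_cases hg : (List.lookup kv.1 ((List.lookup s acc).getD [])).isSome
    · rw [if_pos hg, if_pos hg]
      refine ih (done ++ [kv]) acc hacc (by rw [hsplit]; simp) haccS ?_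
      intro x hx
      rcases List.mem_append.mp hx with hx | hx
      · exact hdone x hx
      · simp at hx; subst hx; exact hg
    · rw [if_neg hg, if_neg hg]
      have hval : (List.lookup kv.1 ((List.lookup p acc).getD [])).getD "" = kv.2 := by
        rw [hacc, hsplit, List.lookup_append]
        have hnd : List.lookup kv.1 done = none := by
          cases hd : List.lookup kv.1 done with
          | none => rfl
          | some w =>
            exact absurd (hdone (kv.1, w) (pv_lookup_mem done kv.1 w hd)) hg
        rw [hnd]
        simp [List.lookup]
      rw [hval]
      set acc' := pvSetIn acc s kv.1 kv.2 with hacc'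
      refine ih (done ++ [kv]) acc' ?_ (by rw [hsplit]; simp) ?_ ?_
      · rw [hacc', pv_lookup_pvSetIn_ne acc s kv.1 kv.2 p hps, hacc]
      · rw [hacc', pv_lookup_pvSetIn_isSome]; exact haccS
      · intro x hx
        obtain ⟨dst0, hdst0⟩ := Option.isSome_iff_exists.mp haccS
        have hlk : List.lookup s acc' = some (dst0 ++ [(kv.1, kv.2)]) := by
          rw [hacc', pv_lookup_pvSetIn_self, hdst0]; rfl
        rw [hlk]
        simp only [Option.getD_some]
        rw [pv_lookup_append_isSome]
        rcases List.mem_append.mp hx with hx | hx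
        · have := hdone x hx
          rw [hdst0] at this
          simp only [Option.getD_some] at this
          rw [this]; rfl
        · simp at hx; subst hx
          simp [List.lookup]

theorem pvMerge_eq (cd : pvCd) (s p : String) : pvMergeB cd s p = pvMergeA cd s p := by
  unfold pvMergeA pvMergeB
  by_cases hps : p = s
  · subst hps
    -- merging a section into itself: every key is already present, both loops do nothing
    have hall : ∀ kv ∈ (List.lookup p cd).getD [],
        (List.lookup kv.1 ((List.lookup p cd).getD [])).isSome := by
      intro kv hkv
      obtain ⟨k, v⟩ := kv
      exact pv_mem_fst_lookup_isSome _ k v hkv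
    have hconst : ∀ (l : List (String × String)),
        (∀ kv ∈ l, (List.lookup kv.1 ((List.lookup p cd).getD [])).isSome) →
        l.foldl (fun a kv => if (List.lookup kv.1 ((List.lookup p a).getD [])).isSome then a
                             else pvSetIn a p kv.1 kv.2) cd = cd ∧
        (l.map (·.1)).foldl (fun a k => if (List.lookup k ((List.lookup p a).getD [])).isSome then a
                             else pvSetIn a p k ((List.lookup k ((List.lookup p a).getD [])).getD "")) cd = cd := by
      intro l
      induction l with
      | nil => intro _; exact ⟨rfl, rfl⟩
      | cons kv t ih =>
        intro hl
        have hg := hl kv (List.mem_cons_self ..)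
        constructor
        · simp only [List.foldl_cons, hg, if_true]
          exact (ih (fun x hx => hl x (List.mem_cons_of_mem _ hx))).1
        · simp only [List.map_cons, List.foldl_cons, hg, if_true]
          exact (ih (fun x hx => hl x (List.mem_cons_of_mem _ hx))).2
    obtain ⟨h1, h2⟩ := hconst _ hall
    rw [h1, h2]
  · cases hs : List.lookup s cd with
    | none =>
      -- section_ is not a key: pvSetIn is the identity, both loops keep cd unchanged
      have hconst : ∀ (l : List (String × String)),
          l.foldl (fun a kv => if (List.lookup kv.1 ((List.lookup s a).getD [])).isSome then a
                               else pvSetIn a s kv.1 kv.2) cd = cd ∧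
          (l.map (·.1)).foldl (fun a k => if (List.lookup k ((List.lookup s a).getD [])).isSome then a
                               else pvSetIn a s k ((List.lookup k ((List.lookup p a).getD [])).getD "")) cd = cd := by
        intro l
        induction l with
        | nil => exact ⟨rfl, rfl⟩
        | cons kv t ih =>
          have hg : (List.lookup kv.1 ((List.lookup s cd).getD [])).isSome = false := by
            rw [hs]; rfl
          constructor
          · simp only [List.foldl_cons, hg, Bool.false_eq_true, if_false]
            rw [pvSetIn_id_of_none _ _ _ _ hs]; exact ih.1
          · simp only [List.map_cons, List.foldl_cons, hg, Bool.false_eq_true, if_false]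
            rw [pvSetIn_id_of_none _ _ _ _ hs]; exact ih.2
      obtain ⟨h1, h2⟩ := hconst _
      rw [h1, h2]
    | some dst0 =>
      exact (pvMergeAux s p hps _ _ [] cd rfl rfl (by rw [hs]; rfl) (by intro x hx; simp at hx)).symm

-- ---- simulation: the recursion and the stack machine compute in lockstep ----
def pvFrames (cdE : pvCd) (s : String) (ps : List String) : List PvFrame :=
  ps.foldr (fun q acc => if (List.lookup q cdE).isSome then PvFrame.visit q :: PvFrame.merge s q :: acc else acc) []

theorem pvFrames_cons (cdE : pvCd) (s p : String) (tl : List String) :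
    pvFrames cdE s (p :: tl) =
      if (List.lookup p cdE).isSome then PvFrame.visit p :: PvFrame.merge s p :: pvFrames cdE s tl
      else pvFrames cdE s tl := rfl

theorem pvPush_eq (cd : pvCd) (s : String) (ps : List String) :
    pvPush cd s ps = pvFrames cd s ps ++ [PvFrame.fin s] := by
  induction ps with
  | nil => rfl
  | cons p tl ih =>
    simp only [pvPush, List.foldr_cons, pvFrames_cons] at *
    by_cases hg : (List.lookup p cd).isSome <;> simp [hg, ih]

theorem pvH_pos (P n : Nat) : 1 ≤ pvH P n := by
  cases n with
  | zero => exact le_refl 1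
  | succ n =>
    unfold pvH
    have := Nat.zero_le ((P+1) * (pvH P n + 2))
    omega

theorem pv_foldl_none {α β : Type} (g : Option α → β → Option α) (hg : ∀ b, g none b = none) :
    ∀ tl : List β, List.foldl g none tl = none := by
  intro tl; induction tl with
  | nil => rfl
  | cons a t iht => rw [List.foldl_cons, hg a]; exact iht

theorem pv_sim (P : Nat) : ∀ (n : Nat) (cd : pvCd) (s : String) (f : List String) (st : pvCd × List String),
    (∀ t, (pvParents cd t).length ≤ P) → pvFillA n cd s f = some st →
    ∃ j, j ≤ pvH P n ∧ ∀ (m : Nat) (rest : List PvFrame),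
      pvRunB (m + j) cd f (PvFrame.visit s :: rest) = pvRunB m st.1 st.2 rest := by
  intro n
  induction n with
  | zero => intro cd s f st _ h; simp [pvFillA] at h
  | succ n ih =>
    have loop : ∀ (s : String) (ps : List String) (cdE cd : pvCd) (f : List String) (st : pvCd × List String),
        (∀ q, (List.lookup q cd).isSome = (List.lookup q cdE).isSome) →
        (∀ t, (pvParents cd t).length ≤ P) →
        (pvExtOpt cd s).isSome →
        pvLoopA (pvFillA n) s ps cd f = some st →
        ∃ j, j ≤ ps.length * (pvH P n + 1) ∧ ∀ (m : Nat) (rest : List PvFrame),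
          pvRunB (m + j) cd f (pvFrames cdE s ps ++ rest) = pvRunB m st.1 st.2 rest := by
      intro s ps
      induction ps with
      | nil =>
        intro cdE cd f st _ _ _ h
        simp only [pvLoopA, List.foldl_nil] at h
        cases h
        exact ⟨0, Nat.zero_le _, fun m rest => rfl⟩
      | cons p tl ihp =>
        intro cdE cd f st hke hP hex h
        simp only [pvLoopA, List.foldl_cons] at h
        by_cases hg : (List.lookup p cd).isSome
        · rw [if_pos hg] at h
          cases hrec : pvFillA n cd p f with
          | none =>
            rw [hrec] at h
            rw [pv_foldl_none _ (fun b => rfl) tl] at h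
            simp at h
          | some st' =>
            rw [hrec] at h
            have hloop2 : pvLoopA (pvFillA n) s tl (pvMergeA st'.1 s p) st'.2 = some st := h
            obtain ⟨j₁, hj₁, eq₁⟩ := ih cd p f st' hP hrec
            have hinv := pvFillA_inv n cd p f st' hrec
            have hex' : (pvExtOpt st'.1 s).isSome := by rw [hinv.1 s]; exact hex
            obtain ⟨hmi, hme⟩ := pvMergeA_inv st'.1 s p st'.2 hex'
            have hpar : ∀ t, pvParents (pvMergeA st'.1 s p) t = pvParents cd t := by
              intro t; unfold pvParents
              rw [hmi.1 t, hinv.1 t]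
            have hke₂ : ∀ q, (List.lookup q (pvMergeA st'.1 s p)).isSome = (List.lookup q cdE).isSome :=
              fun q => (hmi.2.1 q).trans ((hinv.2.1 q).trans (hke q))
            have hP₂ : ∀ t, (pvParents (pvMergeA st'.1 s p) t).length ≤ P :=
              fun t => (hpar t) ▸ hP t
            obtain ⟨j₂, hj₂, eq₂⟩ := ihp cdE (pvMergeA st'.1 s p) st'.2 st hke₂ hP₂ hme hloop2
            refine ⟨j₁ + 1 + j₂, ?_, ?_⟩
            · have : (p :: tl).length * (pvH P n + 1) = tl.length * (pvH P n + 1) + (pvH P n + 1) := by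
                simp [List.length_cons, Nat.succ_mul]
              omega
            · intro m rest
              have hgE : (List.lookup p cdE).isSome = true := by rw [← hke p]; exact hg
              rw [pvFrames_cons, if_pos hgE]
              simp only [List.cons_append]
              have harith : m + (j₁ + 1 + j₂) = (m + j₂ + 1) + j₁ := by omega
              rw [harith, eq₁ (m + j₂ + 1) (PvFrame.merge s p :: (pvFrames cdE s tl ++ rest))]
              show pvRunB (m + j₂ + 1) st'.1 st'.2 (PvFrame.merge s p :: (pvFrames cdE s tl ++ rest)) = _
              rw [show m + j₂ + 1 = (m + j₂) + 1 from rfl]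
              rw [pvRunB]
              rw [pvMerge_eq]
              exact eq₂ m rest
        · rw [if_neg hg] at h
          obtain ⟨j₂, hj₂, eq₂⟩ := ihp cdE cd f st hke hP hex h
          refine ⟨j₂, ?_, ?_⟩
          · have : (p :: tl).length * (pvH P n + 1) = tl.length * (pvH P n + 1) + (pvH P n + 1) := by
              simp [List.length_cons, Nat.succ_mul]
            omega
          · intro m rest
            have hgE : (List.lookup p cdE).isSome = false := by
              rw [← hke p]; exact Bool.eq_false_iff.mpr hg
            rw [pvFrames_cons, if_neg (by simp [hgE])]
            exact eq₂ m rest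
    intro cd s f st hP h
    rw [pvFillA] at h
    by_cases hmem : s ∈ f
    · rw [if_pos hmem] at h
      cases h
      refine ⟨1, pvH_pos P (n+1), fun m rest => ?_⟩
      show pvRunB (m + 1) cd f (PvFrame.visit s :: rest) = _
      rw [pvRunB, if_pos hmem]
    · rw [if_neg hmem] at h
      by_cases hex : (pvExtOpt cd s).isSome
      · rw [if_pos hex] at h
        cases hl : pvLoopA (pvFillA n) s (pvParents cd s) cd f with
        | none => rw [hl] at h; simp at h
        | some st1 =>
          rw [hl] at h
          cases h
          obtain ⟨j₂, hj₂, eq₂⟩ := loop s (pvParents cd s) cd cd f st1 (fun q => rfl) hP hex hl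
          refine ⟨1 + j₂ + 1, ?_, ?_⟩
          · have h1 : j₂ ≤ P * (pvH P n + 1) :=
              le_trans hj₂ (Nat.mul_le_mul_right _ (hP s))
            have h2 : P * (pvH P n + 1) ≤ P * (pvH P n + 2) :=
              Nat.mul_le_mul_left _ (by omega)
            have h3 : P * (pvH P n + 2) ≤ (P + 1) * (pvH P n + 2) :=
              Nat.mul_le_mul_right _ (by omega)
            show 1 + j₂ + 1 ≤ pvH P (n + 1)
            rw [pvH]
            omega
          · intro m rest
            have harith : m + (1 + j₂ + 1) = ((m + 1) + j₂) + 1 := by omega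
            rw [harith, pvRunB, if_neg hmem, if_pos hex]
            rw [pvPush_eq, List.append_assoc]
            have := eq₂ (m + 1) ([PvFrame.fin s] ++ rest)
            rw [this]
            show pvRunB (m + 1) st1.1 st1.2 (PvFrame.fin s :: rest) = _
            rw [pvRunB]
      · rw [if_neg hex] at h
        cases h
        refine ⟨1, pvH_pos P (n+1), fun m rest => ?_⟩
        show pvRunB (m + 1) cd f (PvFrame.visit s :: rest) = _
        rw [pvRunB, if_neg hmem, if_neg hex]

-- ---- fuel exhaustion yields a long path in the inheritance graph ----
def pvPath (R : String → String → Prop) : String → List String → Prop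
  | _, [] => True
  | a, b :: l => R a b ∧ pvPath R b l

def pvLast : String → List String → String
  | a, [] => a
  | _, b :: l => pvLast b l

def pvEdge (cd0 : pvCd) (f0 : List String) (a b : String) : Prop := b ∈ pvSucc cd0 f0 a

theorem pvFillA_none_path (cd0 : pvCd) (f0 : List String) :
    ∀ (n : Nat) (cd : pvCd) (s : String) (f : List String),
      pvInv cd0 f0 cd f → pvFillA n cd s f = none →
      ∃ l : List String, l.length = n ∧ pvPath (pvEdge cd0 f0) s l := by
  intro n
  induction n with
  | zero => intro cd s f _ _; exact ⟨[], rfl, trivial⟩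
  | succ n ih =>
    have loopN : ∀ (s : String) (ps : List String) (cd : pvCd) (f : List String),
        pvInv cd0 f0 cd f → (pvExtOpt cd s).isSome →
        pvLoopA (pvFillA n) s ps cd f = none →
        ∃ p ∈ ps, ∃ l : List String, l.length = n ∧ pvPath (pvEdge cd0 f0) p l ∧
          (List.lookup p cd0).isSome := by
      intro s ps
      induction ps with
      | nil => intro cd f _ _ h; simp [pvLoopA] at h
      | cons p tl ihp =>
        intro cd f hinv hex h
        simp only [pvLoopA, List.foldl_cons] at h
        by_cases hg : (List.lookup p cd).isSome
        · rw [if_pos hg] at h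
          cases hrec : pvFillA n cd p f with
          | none =>
            obtain ⟨l, hlen, hpath⟩ := ih cd p f hinv hrec
            refine ⟨p, List.mem_cons_self .., l, hlen, hpath, ?_⟩
            rw [← hinv.2.1 p]; exact hg
          | some st' =>
            rw [hrec] at h
            have hinv1 := pvFillA_inv n cd p f st' hrec
            have hex1 : (pvExtOpt st'.1 s).isSome := by rw [hinv1.1 s]; exact hex
            obtain ⟨hmi, hme⟩ := pvMergeA_inv st'.1 s p st'.2 hex1
            obtain ⟨q, hq, l, hlen, hpath, hsome⟩ :=
              ihp (pvMergeA st'.1 s p) st'.2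
                (pvInv_trans hinv (pvInv_trans hinv1 hmi)) hme h
            exact ⟨q, List.mem_cons_of_mem _ hq, l, hlen, hpath, hsome⟩
        · rw [if_neg hg] at h
          obtain ⟨q, hq, hrest⟩ := ihp cd f hinv hex h
          exact ⟨q, List.mem_cons_of_mem _ hq, hrest⟩
    intro cd s f hinv h
    rw [pvFillA] at h
    by_cases hmem : s ∈ f
    · rw [if_pos hmem] at h; simp at h
    · rw [if_neg hmem] at h
      by_cases hex : (pvExtOpt cd s).isSome
      · rw [if_pos hex] at h
        cases hl : pvLoopA (pvFillA n) s (pvParents cd s) cd f with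
        | some st1 => rw [hl] at h; simp at h
        | none =>
          obtain ⟨p, hp, l, hlen, hpath, hsome⟩ :=
            loopN s (pvParents cd s) cd f hinv hex hl
          refine ⟨p :: l, by simp [hlen], ?_, hpath⟩
          -- the edge s → p in the ORIGINAL graph
          unfold pvEdge pvSucc
          have hs0 : s ∉ f0 := fun hx => hmem (hinv.2.2 s hx)
          rw [if_neg hs0]
          have hex0 : (pvExtOpt cd0 s).isSome := by rw [← hinv.1 s]; exact hex
          rw [if_pos hex0]
          refine List.mem_filter.mpr ⟨?_, by simpa using hsome⟩
          have : pvParents cd0 s = pvParents cd s := by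
            unfold pvParents; rw [hinv.1 s]
          rw [this]; exact hp
      · rw [if_neg hex] at h; simp at h

-- ---- reachability closure facts ----
theorem pvGrow_sub (cd : pvCd) (f : List String) (S : List String) : ∀ x ∈ S, x ∈ pvGrow cd f S := by
  intro x hx
  unfold pvGrow
  rw [PySem.Set.mem_ofList]
  exact List.mem_append_left _ hx

theorem pvReach_sub (cd : pvCd) (f : List String) : ∀ (k : Nat) (S : List String), ∀ x ∈ S, x ∈ pvReach cd f k S := by
  intro k
  induction k with
  | zero => intro S x hx; exact hx
  | succ k ihk =>
    intro S x hx
    exact ihk (pvGrow cd f S) x (pvGrow_sub cd f S x hx)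

theorem pvPath_last_mem (cd : pvCd) (f : List String) :
    ∀ (l : List String) (a : String) (S : List String) (k : Nat),
      a ∈ S → pvPath (pvEdge cd f) a l → l.length ≤ k →
      pvLast a l ∈ pvReach cd f k S := by
  intro l
  induction l with
  | nil => intro a S k ha _ _; exact pvReach_sub cd f k S a ha
  | cons b l' ihl =>
    intro a S k ha hp hlen
    obtain ⟨hab, hp'⟩ := hp
    cases k with
    | zero => simp at hlen
    | succ k =>
      have hb : b ∈ pvGrow cd f S := by
        unfold pvGrow
        rw [PySem.Set.mem_ofList]
        exact List.mem_append_right _ (List.mem_flatMap.mpr ⟨a, ha, hab⟩)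
      have := ihl b (pvGrow cd f S) k hb hp' (by simpa using hlen)
      exact this

theorem pvPath_append_split (R : String → String → Prop) :
    ∀ (l₁ l₂ : List String) (a : String), pvPath R a (l₁ ++ l₂) →
      pvPath R a l₁ ∧ pvPath R (pvLast a l₁) l₂ := by
  intro l₁
  induction l₁ with
  | nil => intro l₂ a h; exact ⟨trivial, h⟩
  | cons b t ih =>
    intro l₂ a h
    obtain ⟨hab, h'⟩ := h
    obtain ⟨h1, h2⟩ := ih l₂ b h'
    exact ⟨⟨hab, h1⟩, h2⟩

theorem pvPath_snoc (R : String → String → Prop) :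
    ∀ (l : List String) (a x : String), pvPath R a l → R (pvLast a l) x → pvPath R a (l ++ [x]) := by
  intro l
  induction l with
  | nil => intro a x _ h; exact ⟨h, trivial⟩
  | cons b t ih =>
    intro a x hp h
    exact ⟨hp.1, ih b x hp.2 h⟩

theorem pvLast_snoc : ∀ (l : List String) (a x : String), pvLast a (l ++ [x]) = x := by
  intro l
  induction l with
  | nil => intro a x; rfl
  | cons b t ih => intro a x; exact ih b x

theorem pvPath_elem_target (R : String → String → Prop) :
    ∀ (l : List String) (a : String), pvPath R a l → ∀ b ∈ l, ∃ c, R c b := by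
  intro l
  induction l with
  | nil => intro a _ b hb; simp at hb
  | cons x t ih =>
    intro a hp b hb
    rcases List.mem_cons.mp hb with hb | hb
    · subst hb; exact ⟨a, hp.1⟩
    · exact ih x hp.2 b hb

theorem pv_dup_decomp : ∀ (l : List String), ¬ l.Nodup →
    ∃ (x : String) (l₁ l₂ l₃ : List String), l = l₁ ++ (x :: (l₂ ++ (x :: l₃))) := by
  intro l
  induction l with
  | nil => intro h; exact absurd List.nodup_nil h
  | cons a t ih =>
    intro h
    by_cases ha : a ∈ t
    · obtain ⟨s', t', ht⟩ := List.mem_iff_append.mp ha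
      exact ⟨a, [], s', t', by simp [ht]⟩
    · have : ¬ t.Nodup := fun hn => h (List.nodup_cons.mpr ⟨ha, hn⟩)
      obtain ⟨x, l₁, l₂, l₃, hx⟩ := ih this
      exact ⟨x, a :: l₁, l₂, l₃, by simp [hx]⟩

-- elements of a path all carry a lookup-isSome certificate, hence live among the keys
theorem pv_succ_target_key (cd : pvCd) (f : List String) (a b : String) (h : b ∈ pvSucc cd f a) :
    b ∈ cd.map (·.1) := by
  unfold pvSucc at h
  by_cases hf : a ∈ f
  · rw [if_pos hf] at h; simp at h
  · rw [if_neg hf] at h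
    by_cases he : (pvExtOpt cd a).isSome
    · rw [if_pos he] at h
      exact pv_lookup_isSome_mem cd b (List.mem_filter.mp h).2
    · rw [if_neg he] at h; simp at h

-- under Pre_, the fuel given to A's port is sufficient
theorem pvFillA_some_of_pre (cd : pvCd) (s : String) (f : List String)
    (hpre : Pre_infillDict cd s f) :
    ∃ st, pvFillA (cd.length + 2) cd s f = some st := by
  cases hfill : pvFillA (cd.length + 2) cd s f with
  | some st => exact ⟨st, rfl⟩
  | none =>
    exfalso
    obtain ⟨l, hlen, hpath⟩ :=
      pvFillA_none_path cd f (cd.length + 2) cd s f (pvInv_refl cd f) hfill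
    -- all path elements are keys
    have hkeys : ∀ b ∈ l, b ∈ cd.map (·.1) := by
      intro b hb
      obtain ⟨c, hc⟩ := pvPath_elem_target _ l s hpath b hb
      exact pv_succ_target_key cd f c b hc
    -- pigeonhole: the path revisits some section
    have hnd : ¬ l.Nodup := by
      intro hnd
      have h1 : l.toFinset.card = l.length := List.toFinset_card_of_nodup hnd
      have h2 : l.toFinset ⊆ (cd.map (·.1)).toFinset := by
        intro x hx
        exact List.mem_toFinset.mpr (hkeys x (List.mem_toFinset.mp hx))
      have h3 : l.toFinset.card ≤ (cd.map (·.1)).toFinset.card := Finset.card_le_card h2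
      have h4 : (cd.map (·.1)).toFinset.card ≤ (cd.map (·.1)).length := List.toFinset_card_le _
      simp only [List.length_map] at h4
      omega
    obtain ⟨x, l₁, l₂, l₃, hdec⟩ := pv_dup_decomp l hnd
    have N := cd.length + 3
    -- split the path at the two occurrences of x
    rw [hdec] at hpath
    obtain ⟨hp1, hp2⟩ := pvPath_append_split _ l₁ (x :: (l₂ ++ (x :: l₃))) s hpath
    obtain ⟨hedge1, hp3⟩ := hp2
    obtain ⟨hp4, hp5⟩ := pvPath_append_split _ l₂ (x :: l₃) x hp3
    obtain ⟨hedge2, _⟩ := hp5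
    have hlen2 : l₁.length + l₂.length + l₃.length + 2 = cd.length + 2 := by
      rw [hdec] at hlen
      simp [List.length_append] at hlen
      omega
    -- x is reachable from section_
    have hx_reach : x ∈ pvReach cd f (cd.length + 3) [s] := by
      have hpx : pvPath (pvEdge cd f) s (l₁ ++ [x]) := pvPath_snoc _ l₁ s x hp1 hedge1
      have := pvPath_last_mem cd f (l₁ ++ [x]) s [s] (cd.length + 3)
        (List.mem_singleton.mpr rfl) hpx (by simp; omega)
      rwa [pvLast_snoc] at this
    -- x is reachable from its own successors
    have hx_cycle : x ∈ pvReach cd f (cd.length + 3) (pvSucc cd f x) := by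
      cases hl₂ : l₂ with
      | nil =>
        subst hl₂
        have hxx : x ∈ pvSucc cd f x := by
          have : pvLast x ([] : List String) = x := rfl
          rw [this] at hedge2
          exact hedge2
        exact pvReach_sub cd f _ _ x hxx
      | cons y l₂' =>
        subst hl₂
        simp only [List.length_cons] at hlen2
        obtain ⟨hxy, hp6⟩ := hp4
        have hplast : pvLast x (y :: l₂') = pvLast y l₂' := rfl
        rw [hplast] at hedge2
        have hpx : pvPath (pvEdge cd f) y (l₂' ++ [x]) := pvPath_snoc _ l₂' y x hp6 hedge2
        have := pvPath_last_mem cd f (l₂' ++ [x]) y (pvSucc cd f x) (cd.length + 3)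
          hxy hpx (by simp; omega)
        rwa [pvLast_snoc] at this
    exact hpre x hx_reach hx_cycle

-- ---- the parents-count bound for B's fuel ----
theorem pvMaxPar_pos (cd : pvCd) : 1 ≤ pvMaxPar cd := by
  induction cd with
  | nil => exact le_refl 1
  | cons e t ih =>
    unfold pvMaxPar at *
    simp only [List.foldr_cons]
    exact le_trans ih (Nat.le_max_right _ _)

theorem pvMaxPar_mem (cd : pvCd) (a : String) (b : List (String × String)) (h : (a, b) ∈ cd) :
    (((PySem.Str.split? ((List.lookup "extends" b).getD "") ",").getD []).map PySem.Str.strip).length ≤ pvMaxPar cd := by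
  induction cd with
  | nil => simp at h
  | cons e t ih =>
    unfold pvMaxPar at *
    simp only [List.foldr_cons]
    rcases List.mem_cons.mp h with h | h
    · subst h; exact Nat.le_max_left _ _
    · exact le_trans (ih h) (Nat.le_max_right _ _)

theorem pvParents_bound (cd : pvCd) : ∀ t, (pvParents cd t).length ≤ pvMaxPar cd := by
  intro t
  unfold pvParents pvExtOpt
  cases hl : List.lookup t cd with
  | none =>
    simp only [Option.getD_none]
    have : ((((PySem.Str.split? "" ",").getD []).map PySem.Str.strip)).length = 1 := rfl
    calc (((PySem.Str.split? ((List.lookup "extends" ([] : List (String × String))).getD "") ",").getD []).map PySem.Str.strip).length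
        = 1 := rfl
      _ ≤ pvMaxPar cd := pvMaxPar_pos cd
  | some b =>
    simp only [Option.getD_some]
    exact pvMaxPar_mem cd t b (pv_lookup_mem cd t b hl)

theorem pv_witness_ok : Dom_infillDict (pvWitness_infillDict.1) (pvWitness_infillDict.2.1) (pvWitness_infillDict.2.2) ∧ Pre_infillDict (pvWitness_infillDict.1) (pvWitness_infillDict.2.1) (pvWitness_infillDict.2.2) := by
  constructor <;> decide

-- ===== VERDICT (by name: the statement is the Claim_ definition above) =====
theorem infillDict_spec : Claim_equal_infillDict := by
  intro cd s f _ hpre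
  unfold Spec_infillDict infillDict infillDict_alt
  obtain ⟨st, hfill⟩ := pvFillA_some_of_pre cd s f hpre
  rw [hfill]
  obtain ⟨j, hj, heq⟩ := pv_sim (pvMaxPar cd) (cd.length + 2) cd s f st (pvParents_bound cd) hfill
  have hfuel : pvH (pvMaxPar cd) (cd.length + 2) + 1 = (pvH (pvMaxPar cd) (cd.length + 2) + 1 - j) + j := by
    omega
  rw [hfuel, heq (pvH (pvMaxPar cd) (cd.length + 2) + 1 - j) []]
  have : ∃ r, pvH (pvMaxPar cd) (cd.length + 2) + 1 - j = r + 1 := ⟨pvH (pvMaxPar cd) (cd.length + 2) - j, by omega⟩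
  obtain ⟨r, hr⟩ := this
  rw [hr]
  rfl
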